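-- pv_equiv track=rewrite | github.com/Shourai/advent-of-code | 2023/day_09/day_09p2.py | fill_placeholders
-- ===== SOURCE A (Python) =====
-- def fill_placeholders(sequences):
--     new_sequence = []
--     prev_seq = [0] + sequences[-1]
--     new_sequence.append(prev_seq)
--     for seq in sequences[-2::-1]:
--         new_sequence.append([(seq[0] - prev_seq[0])] + seq)
--         prev_seq = new_sequence[-1]
--
--     return new_sequence
-- ===== SOURCE B (Python) =====
-- def fill_placeholders(sequences):
--     # Walk the reversed input recursively, threading only the next head value
--     # (head' = first-of-next-row - head), instead of A's fused loop over a
--     # growing output list with a prev_seq alias.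
--     def walk(head, rows):
--         if not rows:
--             return []
--         first, rest = rows[0], rows[1:]
--         built = [head] + first
--         if rest:
--             return [built] + walk(rest[0][0] - head, rest)
--         return [built]
--
--     return walk(0, sequences[::-1])
-- ===== Notes on version B (the rewrite author's own statement) =====
-- stated objective: alternative
-- what changed: Replaces A's fused loop over a growing output list (with a prev_seq alias into it) by reversing the input once and recursing over the rows, threading only the next head value (head' = next_row[0] - head) and consing each built row.
import Mathlib
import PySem

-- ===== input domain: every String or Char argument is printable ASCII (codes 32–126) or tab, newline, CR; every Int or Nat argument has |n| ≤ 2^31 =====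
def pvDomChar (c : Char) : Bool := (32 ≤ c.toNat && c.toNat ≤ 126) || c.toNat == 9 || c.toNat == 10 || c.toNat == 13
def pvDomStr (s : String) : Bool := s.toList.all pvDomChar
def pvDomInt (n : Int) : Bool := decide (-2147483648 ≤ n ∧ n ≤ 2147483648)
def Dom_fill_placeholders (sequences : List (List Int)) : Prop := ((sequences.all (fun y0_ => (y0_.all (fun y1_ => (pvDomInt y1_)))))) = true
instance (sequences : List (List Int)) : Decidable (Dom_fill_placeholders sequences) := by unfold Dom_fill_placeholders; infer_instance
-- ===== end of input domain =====

-- B walks the reversed input recursively threading only the head value, instead of A's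
-- fused loop over a growing output list; return values agree on Pre_ (alternative decomposition,
-- no speed claim). Pre_ excludes the inputs on which A raises IndexError.

-- ===== PORT A =====
-- l[0] as A uses it; Pre_ guarantees the index is in range, so the default is never taken
def pvGet0 (l : List Int) : Int := (PySem.List.pyGet? l 0).getD 0

-- the 'for seq in …' loop: state = (new_sequence, prev_seq)
def pvFillLoop : List (List Int) → List (List Int) → List Int → List (List Int)
  | [], new_sequence, _ => new_sequence
  | seq :: rest, new_sequence, prev_seq =>
      let ns : List Int := (pvGet0 seq - pvGet0 prev_seq) :: seq
      pvFillLoop rest (new_sequence ++ [ns]) ns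

def fill_placeholders (sequences : List (List Int)) : List (List Int) :=
  match PySem.List.pyGet? sequences (-1) with
  | none => []  -- sequences[-1]: IndexError on the empty list; excluded by Pre_
  | some lastSeq =>
    let prev_seq : List Int := 0 :: lastSeq
    match PySem.List.slice? sequences (some (-2)) none (-1) with  -- sequences[-2::-1]
    | none => []  -- unreachable: step -1 ≠ 0
    | some rev => pvFillLoop rev [prev_seq] prev_seq

-- ===== PORT B =====
def pvWalk : Int → List (List Int) → List (List Int)
  | _, [] => []
  | head, first :: rest =>
      let built : List Int := head :: first
      match rest with
      | [] => [built]
      | nxt :: _ => built :: pvWalk ((PySem.List.pyGet? nxt 0).getD 0 - head) rest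

def fill_placeholders_alt (sequences : List (List Int)) : List (List Int) :=
  pvWalk 0 ((PySem.List.slice? sequences none none (-1)).getD [])  -- sequences[::-1]

-- ===== PRECONDITION & SPEC =====
-- Pre_ excludes exactly the inputs on which Python A raises IndexError: the empty list
-- (sequences[-1]) and lists whose non-last row is empty (seq[0] in the loop).
def Pre_fill_placeholders (sequences : List (List Int)) : Prop :=
  sequences ≠ [] ∧ ∀ s ∈ sequences.dropLast, s ≠ []
instance (sequences : List (List Int)) : Decidable (Pre_fill_placeholders sequences) := by
  unfold Pre_fill_placeholders; infer_instance

def pvWitness_fill_placeholders : List (List Int) := [[1, 2], [3]]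

def Spec_fill_placeholders (sequences : List (List Int)) (out : List (List Int)) : Prop :=
  out = fill_placeholders_alt sequences
instance (sequences : List (List Int)) (out : List (List Int)) : Decidable (Spec_fill_placeholders sequences out) := by
  unfold Spec_fill_placeholders; infer_instance

-- ===== CLAIM (what is proved, stated in full; the proofs are below) =====
def Claim_equal_fill_placeholders : Prop := ∀ (sequences : List (List Int)), Dom_fill_placeholders sequences → Pre_fill_placeholders sequences → Spec_fill_placeholders sequences (fill_placeholders sequences)

-- ===== LEMMAS AND PROOFS =====

-- the rows pvWalk produces after the first one, given the previous head h
def pvTailW (h : Int) : List (List Int) → List (List Int)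
  | [] => []
  | nxt :: rest => pvWalk ((PySem.List.pyGet? nxt 0).getD 0 - h) (nxt :: rest)

theorem pvGet0_cons (h : Int) (p : List Int) : pvGet0 (h :: p) = h := by
  simp [pvGet0, PySem.List.pyGet?, PySem.List.pyIdx?]

theorem pvWalk_cons (h : Int) (s : List Int) (rest : List (List Int)) :
    pvWalk h (s :: rest) = (h :: s) :: pvTailW h rest := by
  cases rest <;> simp [pvWalk, pvTailW]

theorem pvFillLoop_eq (rest : List (List Int)) :
    ∀ (h : Int) (p : List Int) (acc : List (List Int)),
      pvFillLoop rest acc (h :: p) = acc ++ pvTailW h rest := by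
  induction rest with
  | nil => intro h p acc; simp [pvFillLoop, pvTailW]
  | cons seq rest' ih =>
    intro h p acc
    have : pvFillLoop (seq :: rest') acc (h :: p)
        = pvFillLoop rest' (acc ++ [(pvGet0 seq - h) :: seq]) ((pvGet0 seq - h) :: seq) := by
      simp [pvFillLoop, pvGet0_cons]
    rw [this, ih]
    have hrhs : pvTailW h (seq :: rest') = ((pvGet0 seq - h) :: seq) :: pvTailW (pvGet0 seq - h) rest' := by
      rw [show pvTailW h (seq :: rest') = pvWalk (pvGet0 seq - h) (seq :: rest') from rfl, pvWalk_cons]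
    rw [hrhs]
    simp

-- helper: reading xs[j-k] for k = 0 … j yields the reversed (j+1)-prefix
theorem pvFilterMapGet (xs : List (List Int)) :
    ∀ (j : Nat), j < xs.length →
      List.filterMap (fun k => xs[j - k]?) (List.range (j + 1)) = (xs.take (j + 1)).reverse := by
  induction xs with
  | nil => intro j hj; simp at hj
  | cons x t ih =>
    intro j hj
    cases j with
    | zero => simp
    | succ j =>
      rw [List.range_succ, List.filterMap_append]
      have h1 : List.filterMap (fun k => (x :: t)[j + 1 - k]?) (List.range (j + 1))
          = List.filterMap (fun k => t[j - k]?) (List.range (j + 1)) := by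
        apply List.filterMap_congr
        intro k hk
        have hk' : k ≤ j := by
          have := List.mem_range.mp hk; omega
        have : j + 1 - k = (j - k) + 1 := by omega
        rw [this]
        simp
      rw [h1, ih j (by simpa using hj)]
      simp [List.take_succ_cons]

theorem pvSliceNeg2 (xs : List (List Int)) :
    PySem.List.slice? xs (some (-2)) none (-1) = some (xs.dropLast.reverse) := by
  match xs with
  | [] => decide
  | [a] => simp [PySem.List.slice?, PySem.List.sliceIndices]
  | a :: b :: t =>
    have hidx : PySem.List.sliceIndices (a::b::t).length (some (-2)) none (-1)
        = (((t.length : Int)), -1, -1) := by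
      simp [PySem.List.sliceIndices]
      omega
    simp only [PySem.List.slice?, hidx]
    rw [if_neg (by norm_num : ¬ ((-1:Int) = 0))]
    rw [if_neg (by norm_num : ¬ ((0:Int) < -1))]
    rw [if_pos (by omega : (-1:Int) < (t.length : Int))]
    have hcount : (((t.length:Int) - -1 + -(-1) - 1) / -(-1)).toNat = t.length + 1 := by norm_num
    rw [hcount]
    have hfun : ∀ k ∈ List.range (t.length + 1),
        (a :: b :: t)[((t.length:Int) + (-1) * (k:Int)).toNat]? = (a :: b :: t)[t.length - k]? := by
      intro k hk
      have hk' : k < t.length + 1 := List.mem_range.mp hk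
      congr 1
      omega
    rw [List.filterMap_congr hfun]
    have := pvFilterMapGet (a :: b :: t) t.length (by simp)
    rw [this, List.dropLast_eq_take]
    rfl

theorem pvGetNeg1 (xs : List (List Int)) (h : xs ≠ []) :
    PySem.List.pyGet? xs (-1) = some (xs.getLast h) := by
  have hl : 0 < xs.length := List.length_pos_iff.mpr h
  simp only [PySem.List.pyGet?, PySem.List.pyIdx?]
  rw [if_neg (by omega : ¬ ((0:Int) ≤ -1)), if_pos (by omega : -(xs.length:Int) ≤ -1)]
  have h1 : xs.length - ((-(-1:Int)).toNat) = xs.length - 1 := by norm_num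
  rw [h1]; simp only [Option.bind_some]
  rw [List.getLast_eq_getElem]
  exact List.getElem?_eq_getElem (by omega)

theorem pvReverseEq (xs : List (List Int)) (h : xs ≠ []) :
    xs.reverse = xs.getLast h :: xs.dropLast.reverse := by
  conv_lhs => rw [← List.dropLast_append_getLast h]
  simp

-- ===== VERDICT (by name: the statement is the Claim_ definition above) =====
theorem fill_placeholders_spec : Claim_equal_fill_placeholders := by
  intro sequences _ hpre
  obtain ⟨hne, _⟩ := hpre
  unfold Spec_fill_placeholders fill_placeholders fill_placeholders_alt
  rw [pvGetNeg1 sequences hne, pvSliceNeg2, PySem.List.slice?_none_none_neg_one]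
  simp only [Option.getD_some]
  rw [pvReverseEq sequences hne, pvWalk_cons,
      pvFillLoop_eq sequences.dropLast.reverse 0 (sequences.getLast hne) [0 :: sequences.getLast hne]]
  rfl
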